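-- pv_equiv track=rewrite | github.com/rossning92/MyScripts | scripts/r/ai/utils/tools/powershell.py | _strip_transcript
-- ===== SOURCE A (Python) =====
-- def _strip_transcript(text: str) -> str:
--     lines = text.splitlines()
--
--     # Find the start of the actual output
--     start_idx = 0
--     for i, line in enumerate(lines):
--         if line.startswith("Transcript started, output file is"):
--             start_idx = i + 1
--             break
--
--     # Find the end of the actual output
--     end_idx = len(lines)
--     for i in range(len(lines) - 1, -1, -1):
--         if lines[i].startswith("**********************"):
--             if (
--                 i + 1 < len(lines)
--                 and "Windows PowerShell transcript end" in lines[i + 1]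
--             ):
--                 end_idx = i
--                 break
--
--     return "\n".join(lines[start_idx:end_idx]).strip()
-- ===== SOURCE B (Python) =====
-- def _strip_transcript(text: str) -> str:
--     lines = text.splitlines()
--     start_idx = 0
--     end_idx = len(lines)
--     found_start = False
--     # single forward pass: record start once, let the last qualifying end delimiter win
--     for i, line in enumerate(lines):
--         if not found_start and line.startswith("Transcript started, output file is"):
--             start_idx = i + 1
--             found_start = True
--         if (
--             line.startswith("**********************")
--             and i + 1 < len(lines)
--             and "Windows PowerShell transcript end" in lines[i + 1]
--         ):
--             end_idx = i
--     return "\n".join(lines[start_idx:end_idx]).strip()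
-- ===== Notes on version B (the rewrite author's own statement) =====
-- stated objective: alternative
-- what changed: Replaces A's two scans (forward with break for the start marker, backward with break for the end delimiter) by one forward accumulating pass that records the start index once via a flag and keeps overwriting the end index so the last qualifying delimiter wins.
import Mathlib
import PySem

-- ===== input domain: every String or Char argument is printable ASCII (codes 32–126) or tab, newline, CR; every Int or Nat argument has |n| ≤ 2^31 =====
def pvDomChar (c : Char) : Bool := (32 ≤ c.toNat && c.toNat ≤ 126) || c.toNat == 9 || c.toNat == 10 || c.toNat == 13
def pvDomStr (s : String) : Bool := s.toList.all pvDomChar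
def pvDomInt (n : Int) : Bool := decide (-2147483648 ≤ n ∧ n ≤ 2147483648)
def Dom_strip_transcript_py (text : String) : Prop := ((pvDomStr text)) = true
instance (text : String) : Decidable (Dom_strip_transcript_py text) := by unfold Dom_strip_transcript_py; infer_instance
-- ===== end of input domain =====

-- B replaces A's forward-with-break plus backward-with-break scans by ONE forward
-- accumulating pass (start recorded once via a flag, last qualifying end delimiter wins).

-- ===== PORT A =====
-- first loop of A: 'for i, line in enumerate(lines): if line.startswith(...): start_idx = i+1; break'
def aFindStart : List (Int × String) → Int
  | [] => 0
  | (i, line) :: rest =>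
      if PySem.Str.startswith line "Transcript started, output file is" then i + 1
      else aFindStart rest

-- second loop of A: 'for i in range(len(lines)-1, -1, -1): …' with its nested if and break
def aFindEnd (lines : List String) : List Int → Int
  | [] => PySem.List.len lines
  | i :: rest =>
      if PySem.Str.startswith (PySem.List.pyGetD lines i "") "**********************" then
        if decide (i + 1 < PySem.List.len lines)
            && PySem.Str.isIn "Windows PowerShell transcript end" (PySem.List.pyGetD lines (i + 1) "") then i
        else aFindEnd lines rest
      else aFindEnd lines rest

def strip_transcript_py (text : String) : String :=
  let lines := PySem.Str.splitlines text
  let start_idx := aFindStart (PySem.List.enumerate lines)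
  let end_idx := aFindEnd lines (PySem.List.pyRange (PySem.List.len lines - 1) (-1) (-1))
  PySem.Str.strip (PySem.Str.join "\n" (PySem.List.slice lines (some start_idx) (some end_idx)))

-- ===== PORT B =====
-- one iteration of B's single forward loop: the two independent ifs of Source B
def bStep (lines : List String) (st : Bool × Int × Int) (p : Int × String) : Bool × Int × Int :=
  let fs :=
    if !st.1 && PySem.Str.startswith p.2 "Transcript started, output file is" then (true, p.1 + 1)
    else (st.1, st.2.1)
  let e :=
    if PySem.Str.startswith p.2 "**********************"
        && (decide (p.1 + 1 < PySem.List.len lines)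
          && PySem.Str.isIn "Windows PowerShell transcript end" (PySem.List.pyGetD lines (p.1 + 1) "")) then p.1
    else st.2.2
  (fs.1, fs.2, e)

def strip_transcript_py_alt (text : String) : String :=
  let lines := PySem.Str.splitlines text
  let st := (PySem.List.enumerate lines).foldl (bStep lines) (false, 0, PySem.List.len lines)
  PySem.Str.strip (PySem.Str.join "\n" (PySem.List.slice lines (some st.2.1) (some st.2.2)))

-- ===== PRECONDITION & SPEC =====
def Spec_strip_transcript_py (text : String) (out : String) : Prop := out = strip_transcript_py_alt text
instance (text : String) (out : String) : Decidable (Spec_strip_transcript_py text out) := by unfold Spec_strip_transcript_py; infer_instance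

-- ===== CLAIM (what is proved, stated in full; the proofs are below) =====
def Claim_equal_strip_transcript_py : Prop := ∀ (text : String), Dom_strip_transcript_py text → Spec_strip_transcript_py text (strip_transcript_py text)

-- ===== LEMMAS AND PROOFS =====

-- start-only projection of B's step
def stS (st : Bool × Int) (p : Int × String) : Bool × Int :=
  if !st.1 && PySem.Str.startswith p.2 "Transcript started, output file is" then (true, p.1 + 1)
  else st

-- end-only projection of B's step
def stE (lines : List String) (e : Int) (p : Int × String) : Int :=
  if PySem.Str.startswith p.2 "**********************"
      && (decide (p.1 + 1 < PySem.List.len lines)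
        && PySem.Str.isIn "Windows PowerShell transcript end" (PySem.List.pyGetD lines (p.1 + 1) "")) then p.1
  else e

theorem foldl_bStep_split (lines : List String) (l : List (Int × String)) (f : Bool) (s e : Int) :
    l.foldl (bStep lines) (f, s, e)
      = ((l.foldl stS (f, s)).1, (l.foldl stS (f, s)).2, l.foldl (stE lines) e) := by
  induction l generalizing f s e with
  | nil => rfl
  | cons p rest ih =>
      simp only [List.foldl_cons, bStep, stS, stE]
      by_cases h : (!f && PySem.Str.startswith p.2 "Transcript started, output file is") = true
      · rw [if_pos h]; exact ih true (p.1 + 1) _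
      · rw [if_neg h]; exact ih f s _

theorem foldl_stS_found (l : List (Int × String)) (s : Int) :
    l.foldl stS (true, s) = (true, s) := by
  induction l with
  | nil => rfl
  | cons p rest ih => simpa [stS] using ih

-- generalized default version of aFindStart
def sAux (s0 : Int) : List (Int × String) → Int
  | [] => s0
  | (i, line) :: rest =>
      if PySem.Str.startswith line "Transcript started, output file is" then i + 1
      else sAux s0 rest

theorem foldl_stS_eq_sAux (l : List (Int × String)) (s0 : Int) :
    (l.foldl stS (false, s0)).2 = sAux s0 l := by
  induction l generalizing s0 with
  | nil => rfl
  | cons p rest ih =>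
      obtain ⟨i, line⟩ := p
      simp only [List.foldl_cons, stS, sAux, Bool.not_false, Bool.true_and]
      by_cases h : PySem.Str.startswith line "Transcript started, output file is" = true
      · rw [if_pos h, if_pos h, foldl_stS_found]
      · rw [if_neg h, if_neg h]; exact ih s0

theorem sAux_zero (l : List (Int × String)) : sAux 0 l = aFindStart l := by
  induction l with
  | nil => rfl
  | cons p rest ih => cases p; simp [sAux, aFindStart, ih]

-- generalized default version of aFindEnd (A's backward scan)
def eAux (lines : List String) (e0 : Int) : List Int → Int
  | [] => e0
  | i :: rest =>
      if PySem.Str.startswith (PySem.List.pyGetD lines i "") "**********************"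
          && (decide (i + 1 < PySem.List.len lines)
            && PySem.Str.isIn "Windows PowerShell transcript end" (PySem.List.pyGetD lines (i + 1) "")) then i
      else eAux lines e0 rest

theorem aFindEnd_eq_eAux (lines : List String) (l : List Int) :
    aFindEnd lines l = eAux lines (PySem.List.len lines) l := by
  induction l with
  | nil => rfl
  | cons i rest ih =>
      simp only [aFindEnd, eAux]
      by_cases h1 : PySem.Str.startswith (PySem.List.pyGetD lines i "") "**********************" = true
      · by_cases h2 : (decide (i + 1 < PySem.List.len lines)
            && PySem.Str.isIn "Windows PowerShell transcript end" (PySem.List.pyGetD lines (i + 1) "")) = true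
        · rw [if_pos h1, if_pos h2, if_pos (by rw [h1, h2]; rfl)]
        · rw [if_pos h1, if_neg h2, if_neg (by rw [h1, Bool.true_and]; exact h2)]; exact ih
      · rw [if_neg h1, if_neg (fun hc => h1 ((Bool.and_eq_true _ _).mp hc).1)]; exact ih

theorem foldl_stE_eq_eAux (lines : List String) (m : Nat) (e0 : Int) :
    ((PySem.List.pyRange 0 m 1).map (fun j => (j, PySem.List.pyGetD lines j ""))).foldl (stE lines) e0
      = eAux lines e0 (PySem.List.pyRange ((m : Int) - 1) (-1) (-1)) := by
  induction m generalizing e0 with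
  | zero =>
      rw [PySem.List.pyRange_one_eq_nil (by norm_num), PySem.List.pyRange_neg_one_eq_nil (by norm_num)]
      rfl
  | succ k ih =>
      have hcast : ((k + 1 : Nat) : Int) = (k : Int) + 1 := by push_cast; ring
      rw [hcast, PySem.List.pyRange_one_succ_right (by positivity)]
      have h2 : (k : Int) + 1 - 1 = (k : Int) := by ring
      rw [h2, PySem.List.pyRange_neg_one_cons (by omega)]
      simp only [List.map_append, List.foldl_append, List.map_cons, List.map_nil, List.foldl_cons,
        List.foldl_nil, eAux]
      by_cases h : (PySem.Str.startswith (PySem.List.pyGetD lines (k : Int) "") "**********************"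
          && (decide ((k : Int) + 1 < PySem.List.len lines)
            && PySem.Str.isIn "Windows PowerShell transcript end" (PySem.List.pyGetD lines ((k : Int) + 1) ""))) = true
      · simp only [stE]; rw [if_pos h, if_pos h]
      · simp only [stE]; rw [if_neg h, if_neg h]; exact ih e0

-- ===== VERDICT (by name: the statement is the Claim_ definition above) =====
theorem strip_transcript_py_spec : Claim_equal_strip_transcript_py := by
  intro text _
  unfold Spec_strip_transcript_py strip_transcript_py strip_transcript_py_alt
  simp only [foldl_bStep_split, foldl_stS_eq_sAux, sAux_zero, aFindEnd_eq_eAux,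
    PySem.List.enumerate_eq_map_pyRange _ "", PySem.List.len_eq, foldl_stE_eq_eAux]
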